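-- pv_equiv track=rewrite | github.com/kiwiforword/ZCanPro | 1-TestComm/TestComm.py | CalCrc32Ex
-- ===== SOURCE A (Python) =====
-- crc32TableEx =[\
-- 	0x00000000, 0x77073096, 0xEE0E612C, 0x990951BA, 0x076DC419, 0x706AF48F, 0xE963A535, 0x9E6495A3,
-- 	0x0EDB8832, 0x79DCB8A4, 0xE0D5E91E, 0x97D2D988, 0x09B64C2B, 0x7EB17CBD, 0xE7B82D07, 0x90BF1D91,
-- 	0x1DB71064, 0x6AB020F2, 0xF3B97148, 0x84BE41DE, 0x1ADAD47D, 0x6DDDE4EB, 0xF4D4B551, 0x83D385C7,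
-- 	0x136C9856, 0x646BA8C0, 0xFD62F97A, 0x8A65C9EC, 0x14015C4F, 0x63066CD9, 0xFA0F3D63, 0x8D080DF5,
-- 	0x3B6E20C8, 0x4C69105E, 0xD56041E4, 0xA2677172, 0x3C03E4D1, 0x4B04D447, 0xD20D85FD, 0xA50AB56B,
-- 	0x35B5A8FA, 0x42B2986C, 0xDBBBC9D6, 0xACBCF940, 0x32D86CE3, 0x45DF5C75, 0xDCD60DCF, 0xABD13D59,
-- 	0x26D930AC, 0x51DE003A, 0xC8D75180, 0xBFD06116, 0x21B4F4B5, 0x56B3C423, 0xCFBA9599, 0xB8BDA50F,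
-- 	0x2802B89E, 0x5F058808, 0xC60CD9B2, 0xB10BE924, 0x2F6F7C87, 0x58684C11, 0xC1611DAB, 0xB6662D3D,
-- 	0x76DC4190, 0x01DB7106, 0x98D220BC, 0xEFD5102A, 0x71B18589, 0x06B6B51F, 0x9FBFE4A5, 0xE8B8D433,
-- 	0x7807C9A2, 0x0F00F934, 0x9609A88E, 0xE10E9818, 0x7F6A0DBB, 0x086D3D2D, 0x91646C97, 0xE6635C01,
-- 	0x6B6B51F4, 0x1C6C6162, 0x856530D8, 0xF262004E, 0x6C0695ED, 0x1B01A57B, 0x8208F4C1, 0xF50FC457,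
-- 	0x65B0D9C6, 0x12B7E950, 0x8BBEB8EA, 0xFCB9887C, 0x62DD1DDF, 0x15DA2D49, 0x8CD37CF3, 0xFBD44C65,
-- 	0x4DB26158, 0x3AB551CE, 0xA3BC0074, 0xD4BB30E2, 0x4ADFA541, 0x3DD895D7, 0xA4D1C46D, 0xD3D6F4FB,
-- 	0x4369E96A, 0x346ED9FC, 0xAD678846, 0xDA60B8D0, 0x44042D73, 0x33031DE5, 0xAA0A4C5F, 0xDD0D7CC9,
-- 	0x5005713C, 0x270241AA, 0xBE0B1010, 0xC90C2086, 0x5768B525, 0x206F85B3, 0xB966D409, 0xCE61E49F,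
-- 	0x5EDEF90E, 0x29D9C998, 0xB0D09822, 0xC7D7A8B4, 0x59B33D17, 0x2EB40D81, 0xB7BD5C3B, 0xC0BA6CAD,
-- 	0xEDB88320, 0x9ABFB3B6, 0x03B6E20C, 0x74B1D29A, 0xEAD54739, 0x9DD277AF, 0x04DB2615, 0x73DC1683,
-- 	0xE3630B12, 0x94643B84, 0x0D6D6A3E, 0x7A6A5AA8, 0xE40ECF0B, 0x9309FF9D, 0x0A00AE27, 0x7D079EB1,
-- 	0xF00F9344, 0x8708A3D2, 0x1E01F268, 0x6906C2FE, 0xF762575D, 0x806567CB, 0x196C3671, 0x6E6B06E7,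
-- 	0xFED41B76, 0x89D32BE0, 0x10DA7A5A, 0x67DD4ACC, 0xF9B9DF6F, 0x8EBEEFF9, 0x17B7BE43, 0x60B08ED5,
-- 	0xD6D6A3E8, 0xA1D1937E, 0x38D8C2C4, 0x4FDFF252, 0xD1BB67F1, 0xA6BC5767, 0x3FB506DD, 0x48B2364B,
-- 	0xD80D2BDA, 0xAF0A1B4C, 0x36034AF6, 0x41047A60, 0xDF60EFC3, 0xA867DF55, 0x316E8EEF, 0x4669BE79,
-- 	0xCB61B38C, 0xBC66831A, 0x256FD2A0, 0x5268E236, 0xCC0C7795, 0xBB0B4703, 0x220216B9, 0x5505262F,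
-- 	0xC5BA3BBE, 0xB2BD0B28, 0x2BB45A92, 0x5CB36A04, 0xC2D7FFA7, 0xB5D0CF31, 0x2CD99E8B, 0x5BDEAE1D,
-- 	0x9B64C2B0, 0xEC63F226, 0x756AA39C, 0x026D930A, 0x9C0906A9, 0xEB0E363F, 0x72076785, 0x05005713,
-- 	0x95BF4A82, 0xE2B87A14, 0x7BB12BAE, 0x0CB61B38, 0x92D28E9B, 0xE5D5BE0D, 0x7CDCEFB7, 0x0BDBDF21,
-- 	0x86D3D2D4, 0xF1D4E242, 0x68DDB3F8, 0x1FDA836E, 0x81BE16CD, 0xF6B9265B, 0x6FB077E1, 0x18B74777,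
-- 	0x88085AE6, 0xFF0F6A70, 0x66063BCA, 0x11010B5C, 0x8F659EFF, 0xF862AE69, 0x616BFFD3, 0x166CCF45,
-- 	0xA00AE278, 0xD70DD2EE, 0x4E048354, 0x3903B3C2, 0xA7672661, 0xD06016F7, 0x4969474D, 0x3E6E77DB,
-- 	0xAED16A4A, 0xD9D65ADC, 0x40DF0B66, 0x37D83BF0, 0xA9BCAE53, 0xDEBB9EC5, 0x47B2CF7F, 0x30B5FFE9,
-- 	0xBDBDF21C, 0xCABAC28A, 0x53B39330, 0x24B4A3A6, 0xBAD03605, 0xCDD70693, 0x54DE5729, 0x23D967BF,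
-- 	0xB3667A2E, 0xC4614AB8, 0x5D681B02, 0x2A6F2B94, 0xB40BBE37, 0xC30C8EA1, 0x5A05DF1B, 0x2D02EF8D
-- ]
--
-- def CalCrc32Ex(datalist, size, initvalue):
--
--     if 1 == size % 2:
--
--         return 0
--     else:
--
--         crc = initvalue
--
--         for index in range(0, size):
--             crc = crc32TableEx[(crc ^ (datalist[index] & 0xFF)) & 0xFF] ^ (crc >> 8)
--
--     return crc
-- ===== SOURCE B (Python) =====
-- def CalCrc32Ex(datalist, size, initvalue):
--     if size % 2 == 1:
--         return 0
--     crc = initvalue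
--     for index in range(0, size):
--         crc ^= datalist[index] & 0xFF
--         for _ in range(8):
--             crc = (crc >> 1) ^ 0xEDB88320 if (crc & 1) else (crc >> 1)
--     return crc
-- ===== Notes on version B (the rewrite author's own statement) =====
-- stated objective: simpler
-- what changed: Replaces the 256-entry lookup table with the classic table-free bitwise CRC-32: per byte, xor the byte into crc and do 8 shift/conditional-xor rounds with the reflected polynomial 0xEDB88320, deleting the crc32TableEx constant entirely.
import Mathlib
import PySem

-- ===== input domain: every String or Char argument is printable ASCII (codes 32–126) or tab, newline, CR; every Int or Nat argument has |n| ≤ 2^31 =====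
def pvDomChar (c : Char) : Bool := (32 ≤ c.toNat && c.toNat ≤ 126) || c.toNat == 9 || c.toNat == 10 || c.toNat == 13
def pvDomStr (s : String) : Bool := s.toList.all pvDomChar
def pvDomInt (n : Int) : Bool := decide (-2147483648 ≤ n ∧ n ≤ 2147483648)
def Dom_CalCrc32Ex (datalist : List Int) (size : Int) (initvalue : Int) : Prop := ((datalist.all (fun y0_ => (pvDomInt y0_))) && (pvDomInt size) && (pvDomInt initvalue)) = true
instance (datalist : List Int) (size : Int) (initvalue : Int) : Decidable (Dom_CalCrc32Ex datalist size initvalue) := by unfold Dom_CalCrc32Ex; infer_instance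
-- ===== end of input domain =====

-- B replaces A's 256-entry CRC-32 lookup table by the classic table-free bitwise loop
-- (8 shift/conditional-xor rounds per byte with the reflected polynomial 0xEDB88320);
-- objective: simpler (the table constant disappears), same return value on all of Pre_.

-- ===== PORT A =====
def crc32TableEx : List Int := [
  0x00000000, 0x77073096, 0xEE0E612C, 0x990951BA, 0x076DC419, 0x706AF48F, 0xE963A535, 0x9E6495A3,
  0x0EDB8832, 0x79DCB8A4, 0xE0D5E91E, 0x97D2D988, 0x09B64C2B, 0x7EB17CBD, 0xE7B82D07, 0x90BF1D91,
  0x1DB71064, 0x6AB020F2, 0xF3B97148, 0x84BE41DE, 0x1ADAD47D, 0x6DDDE4EB, 0xF4D4B551, 0x83D385C7,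
  0x136C9856, 0x646BA8C0, 0xFD62F97A, 0x8A65C9EC, 0x14015C4F, 0x63066CD9, 0xFA0F3D63, 0x8D080DF5,
  0x3B6E20C8, 0x4C69105E, 0xD56041E4, 0xA2677172, 0x3C03E4D1, 0x4B04D447, 0xD20D85FD, 0xA50AB56B,
  0x35B5A8FA, 0x42B2986C, 0xDBBBC9D6, 0xACBCF940, 0x32D86CE3, 0x45DF5C75, 0xDCD60DCF, 0xABD13D59,
  0x26D930AC, 0x51DE003A, 0xC8D75180, 0xBFD06116, 0x21B4F4B5, 0x56B3C423, 0xCFBA9599, 0xB8BDA50F,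
  0x2802B89E, 0x5F058808, 0xC60CD9B2, 0xB10BE924, 0x2F6F7C87, 0x58684C11, 0xC1611DAB, 0xB6662D3D,
  0x76DC4190, 0x01DB7106, 0x98D220BC, 0xEFD5102A, 0x71B18589, 0x06B6B51F, 0x9FBFE4A5, 0xE8B8D433,
  0x7807C9A2, 0x0F00F934, 0x9609A88E, 0xE10E9818, 0x7F6A0DBB, 0x086D3D2D, 0x91646C97, 0xE6635C01,
  0x6B6B51F4, 0x1C6C6162, 0x856530D8, 0xF262004E, 0x6C0695ED, 0x1B01A57B, 0x8208F4C1, 0xF50FC457,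
  0x65B0D9C6, 0x12B7E950, 0x8BBEB8EA, 0xFCB9887C, 0x62DD1DDF, 0x15DA2D49, 0x8CD37CF3, 0xFBD44C65,
  0x4DB26158, 0x3AB551CE, 0xA3BC0074, 0xD4BB30E2, 0x4ADFA541, 0x3DD895D7, 0xA4D1C46D, 0xD3D6F4FB,
  0x4369E96A, 0x346ED9FC, 0xAD678846, 0xDA60B8D0, 0x44042D73, 0x33031DE5, 0xAA0A4C5F, 0xDD0D7CC9,
  0x5005713C, 0x270241AA, 0xBE0B1010, 0xC90C2086, 0x5768B525, 0x206F85B3, 0xB966D409, 0xCE61E49F,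
  0x5EDEF90E, 0x29D9C998, 0xB0D09822, 0xC7D7A8B4, 0x59B33D17, 0x2EB40D81, 0xB7BD5C3B, 0xC0BA6CAD,
  0xEDB88320, 0x9ABFB3B6, 0x03B6E20C, 0x74B1D29A, 0xEAD54739, 0x9DD277AF, 0x04DB2615, 0x73DC1683,
  0xE3630B12, 0x94643B84, 0x0D6D6A3E, 0x7A6A5AA8, 0xE40ECF0B, 0x9309FF9D, 0x0A00AE27, 0x7D079EB1,
  0xF00F9344, 0x8708A3D2, 0x1E01F268, 0x6906C2FE, 0xF762575D, 0x806567CB, 0x196C3671, 0x6E6B06E7,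
  0xFED41B76, 0x89D32BE0, 0x10DA7A5A, 0x67DD4ACC, 0xF9B9DF6F, 0x8EBEEFF9, 0x17B7BE43, 0x60B08ED5,
  0xD6D6A3E8, 0xA1D1937E, 0x38D8C2C4, 0x4FDFF252, 0xD1BB67F1, 0xA6BC5767, 0x3FB506DD, 0x48B2364B,
  0xD80D2BDA, 0xAF0A1B4C, 0x36034AF6, 0x41047A60, 0xDF60EFC3, 0xA867DF55, 0x316E8EEF, 0x4669BE79,
  0xCB61B38C, 0xBC66831A, 0x256FD2A0, 0x5268E236, 0xCC0C7795, 0xBB0B4703, 0x220216B9, 0x5505262F,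
  0xC5BA3BBE, 0xB2BD0B28, 0x2BB45A92, 0x5CB36A04, 0xC2D7FFA7, 0xB5D0CF31, 0x2CD99E8B, 0x5BDEAE1D,
  0x9B64C2B0, 0xEC63F226, 0x756AA39C, 0x026D930A, 0x9C0906A9, 0xEB0E363F, 0x72076785, 0x05005713,
  0x95BF4A82, 0xE2B87A14, 0x7BB12BAE, 0x0CB61B38, 0x92D28E9B, 0xE5D5BE0D, 0x7CDCEFB7, 0x0BDBDF21,
  0x86D3D2D4, 0xF1D4E242, 0x68DDB3F8, 0x1FDA836E, 0x81BE16CD, 0xF6B9265B, 0x6FB077E1, 0x18B74777,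
  0x88085AE6, 0xFF0F6A70, 0x66063BCA, 0x11010B5C, 0x8F659EFF, 0xF862AE69, 0x616BFFD3, 0x166CCF45,
  0xA00AE278, 0xD70DD2EE, 0x4E048354, 0x3903B3C2, 0xA7672661, 0xD06016F7, 0x4969474D, 0x3E6E77DB,
  0xAED16A4A, 0xD9D65ADC, 0x40DF0B66, 0x37D83BF0, 0xA9BCAE53, 0xDEBB9EC5, 0x47B2CF7F, 0x30B5FFE9,
  0xBDBDF21C, 0xCABAC28A, 0x53B39330, 0x24B4A3A6, 0xBAD03605, 0xCDD70693, 0x54DE5729, 0x23D967BF,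
  0xB3667A2E, 0xC4614AB8, 0x5D681B02, 0x2A6F2B94, 0xB40BBE37, 0xC30C8EA1, 0x5A05DF1B, 0x2D02EF8D
]

-- Pre_ guarantees 0 ≤ index < datalist.length on every loop iteration, so
-- `PySem.List.pyGetD datalist index 0` is exactly Python's `datalist[index]` there;
-- the table index `(… ) & 0xFF` is always in [0, 256), so the table lookup never raises.
def CalCrc32Ex (datalist : List Int) (size : Int) (initvalue : Int) : Int :=
  if PySem.Int.mod size 2 = 1 then 0
  else
    (PySem.List.pyRange 0 size).foldl
      (fun crc index =>
        PySem.Int.bxor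
          (PySem.List.pyGetD crc32TableEx
            (PySem.Int.band
              (PySem.Int.bxor crc (PySem.Int.band (PySem.List.pyGetD datalist index 0) 0xFF)) 0xFF) 0)
          (crc >>> (8 : Nat)))
      initvalue

-- ===== PORT B =====
def CalCrc32Ex_alt (datalist : List Int) (size : Int) (initvalue : Int) : Int :=
  if PySem.Int.mod size 2 = 1 then 0
  else
    (PySem.List.pyRange 0 size).foldl
      (fun crc index =>
        (PySem.List.pyRange 0 8).foldl
          (fun c _ =>
            if PySem.Int.band c 1 ≠ 0 then PySem.Int.bxor (c >>> (1 : Nat)) 0xEDB88320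
            else c >>> (1 : Nat))
          (PySem.Int.bxor crc (PySem.Int.band (PySem.List.pyGetD datalist index 0) 0xFF)))
      initvalue

-- ===== PRECONDITION & SPEC =====
-- Pre_ excludes exactly the inputs where Python raises IndexError: an even size
-- strictly larger than len(datalist) (odd sizes return 0 before touching the list).
def Pre_CalCrc32Ex (datalist : List Int) (size : Int) (initvalue : Int) : Prop :=
  PySem.Int.mod size 2 = 1 ∨ size ≤ datalist.length
instance (datalist : List Int) (size : Int) (initvalue : Int) : Decidable (Pre_CalCrc32Ex datalist size initvalue) := by unfold Pre_CalCrc32Ex; infer_instance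

def pvWitness_CalCrc32Ex : List Int × Int × Int := ([49, 50, 51, 52], 4, 0)

def Spec_CalCrc32Ex (datalist : List Int) (size : Int) (initvalue : Int) (out : Int) : Prop := out = CalCrc32Ex_alt datalist size initvalue
instance (datalist : List Int) (size : Int) (initvalue : Int) (out : Int) : Decidable (Spec_CalCrc32Ex datalist size initvalue out) := by unfold Spec_CalCrc32Ex; infer_instance

-- ===== CLAIM (what is proved, stated in full; the proofs are below) =====
def Claim_equal_CalCrc32Ex : Prop := ∀ (datalist : List Int) (size : Int) (initvalue : Int), Dom_CalCrc32Ex datalist size initvalue → Pre_CalCrc32Ex datalist size initvalue → Spec_CalCrc32Ex datalist size initvalue (CalCrc32Ex datalist size initvalue)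

-- ===== LEMMAS AND PROOFS =====

-- the bitwise round of B's inner loop, and its k-fold iterate
def pvRound (c : Int) : Int :=
  if PySem.Int.band c 1 ≠ 0 then PySem.Int.bxor (c >>> (1 : Nat)) 0xEDB88320 else c >>> (1 : Nat)

def pvIter : Nat → Int → Int
  | 0, c => c
  | k+1, c => pvIter k (pvRound c)

lemma pv_bxor_eq_xor (a b : Int) : PySem.Int.bxor a b = Int.xor a b := by
  cases a <;> cases b <;> simp [PySem.Int.bxor, Int.xor] <;> omega

lemma pv_xor_comm (a b : Int) : Int.xor a b = Int.xor b a := by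
  cases a <;> cases b <;> simp [Int.xor, Nat.xor_comm]

lemma pv_xor_assoc (a b c : Int) : Int.xor (Int.xor a b) c = Int.xor a (Int.xor b c) := by
  cases a <;> cases b <;> cases c <;> simp [Int.xor, Nat.xor_assoc]

lemma pv_xor_zero (a : Int) : Int.xor a 0 = a := by cases a <;> simp [Int.xor]

lemma pv_zero_xor (a : Int) : Int.xor 0 a = a := by rw [pv_xor_comm, pv_xor_zero]

lemma pv_shiftRight_one (c : Int) : c >>> (1 : Nat) = c / 2 := by
  rw [Int.shiftRight_eq_div_pow]; norm_num

lemma pv_shiftRight_eight (c : Int) : c >>> (8 : Nat) = c / 256 := by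
  rw [Int.shiftRight_eq_div_pow]; norm_num

lemma pv_bodd_emod (c : Int) : (if c.bodd then (1 : Int) else 0) = c % 2 := by
  have h := Int.bodd_add_div2 c
  rw [Int.div2_val] at h
  cases hb : c.bodd <;> rw [hb] at h <;> simp at h ⊢ <;> omega

lemma pv_band_one (c : Int) : PySem.Int.band c 1 = if c.bodd then 1 else 0 := by
  rw [PySem.Int.band_one, PySem.Int.mod_eq_emod_of_pos (by norm_num), pv_bodd_emod]

lemma pv_round_bit (b : Bool) (n : Int) :
    pvRound (Int.bit b n) = if b then Int.xor n 0xEDB88320 else n := by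
  unfold pvRound
  rw [pv_band_one, Int.bodd_bit, pv_shiftRight_one, ← Int.div2_val, Int.div2_bit, pv_bxor_eq_xor]
  cases b <;> simp

lemma pv_round_xor_even (u z : Int) (hz : z.bodd = false) :
    pvRound (Int.xor u z) = Int.xor (pvRound u) z.div2 := by
  conv_lhs => rw [← Int.bit_decomp u, ← Int.bit_decomp z]
  rw [hz, Int.lxor_bit, pv_round_bit]
  conv_rhs => rw [← Int.bit_decomp u]
  rw [pv_round_bit]
  cases hu : u.bodd <;> simp
  rw [pv_xor_assoc, pv_xor_assoc, pv_xor_comm z.div2]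

lemma pv_bodd_of_even (z : Int) (hz : z % 2 = 0) : z.bodd = false := by
  have h := pv_bodd_emod z
  cases hb : z.bodd <;> rw [hb] at h <;> simp at h <;> omega

lemma pv_iter_xor (k : Nat) (u w : Int) :
    pvIter k (Int.xor u (w * 2 ^ k)) = Int.xor (pvIter k u) w := by
  induction k generalizing u with
  | zero => simp [pvIter]
  | succ k ih =>
    have hz : (w * 2 ^ (k + 1)) % 2 = 0 := by
      have : w * 2 ^ (k + 1) = (w * 2 ^ k) * 2 := by ring
      rw [this]; omega
    show pvIter k (pvRound (Int.xor u (w * 2 ^ (k + 1)))) = Int.xor (pvIter k (pvRound u)) w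
    rw [pv_round_xor_even _ _ (pv_bodd_of_even _ hz), Int.div2_val,
      show w * 2 ^ (k + 1) = (w * 2 ^ k) * 2 by ring,
      Int.mul_ediv_cancel _ (by norm_num), ih]

lemma pv_div2_xor (u v : Int) : (Int.xor u v).div2 = Int.xor u.div2 v.div2 := by
  conv_lhs => rw [← Int.bit_decomp u, ← Int.bit_decomp v]
  rw [Int.lxor_bit, Int.div2_bit]

lemma pv_ediv2_xor (u v : Int) : (Int.xor u v) / 2 = Int.xor (u / 2) (v / 2) := by
  rw [← Int.div2_val, ← Int.div2_val, ← Int.div2_val, pv_div2_xor]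

lemma pv_ediv_pow_xor (k : Nat) (u v : Int) :
    (Int.xor u v) / 2 ^ k = Int.xor (u / 2 ^ k) (v / 2 ^ k) := by
  induction k generalizing u v with
  | zero => simp
  | succ k ih =>
    have h2 : ∀ a : Int, a / 2 ^ (k + 1) = (a / 2) / 2 ^ k := by
      intro a
      rw [Int.ediv_ediv_of_nonneg (by norm_num)]
      norm_num [pow_succ, mul_comm]
    rw [h2, h2, h2, pv_ediv2_xor, ih]

lemma pv_emod_two_pow_succ (c : Int) (k : Nat) :
    c % 2 ^ (k + 1) = 2 * (c / 2 % 2 ^ k) + c % 2 := by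
  have hdd : c / 2 ^ (k + 1) = (c / 2) / 2 ^ k := by
    rw [Int.ediv_ediv_of_nonneg (by norm_num)]
    norm_num [pow_succ, mul_comm]
  have h1 := Int.emod_def c (2 ^ (k + 1))
  have h2 := Int.emod_def (c / 2) (2 ^ k)
  have h3 := Int.emod_def c 2
  rw [h1, h2, hdd]
  ring_nf
  omega

lemma pv_decomp (k : Nat) (c : Int) :
    Int.xor (c % 2 ^ k) ((c / 2 ^ k) * 2 ^ k) = c := by
  induction k generalizing c with
  | zero => simp [pv_zero_xor]
  | succ k ih =>
    have hb : c % 2 = if c.bodd then 1 else 0 := (pv_bodd_emod c).symm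
    have hdd : c / 2 ^ (k + 1) = (c / 2) / 2 ^ k := by
      rw [Int.ediv_ediv_of_nonneg (by norm_num)]
      norm_num [pow_succ, mul_comm]
    have hlow : c % 2 ^ (k + 1) = Int.bit c.bodd (c / 2 % 2 ^ k) := by
      rw [Int.bit_val, pv_emod_two_pow_succ, hb]
      cases c.bodd <;> simp
    have hhigh : (c / 2 ^ (k + 1)) * 2 ^ (k + 1) = Int.bit false ((c / 2 / 2 ^ k) * 2 ^ k) := by
      rw [Int.bit_val, hdd]
      simp
      ring
    rw [hlow, hhigh, Int.lxor_bit]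
    have := ih (c / 2)
    rw [Bool.xor_false, this, ← Int.div2_val, Int.bit_decomp]

lemma pv_band_255 (c : Int) : PySem.Int.band c 255 = c % 256 := by
  unfold PySem.Int.band
  have h255 : ((255 : Int).toNat) = 255 := rfl
  split_ifs with h1 h2 h2
  · rw [h255, Nat.and_two_pow_sub_one_eq_mod c.toNat 8]
    omega
  · norm_num at h2
  · rw [h255]
    have := Nat.and_two_pow_sub_one_eq_mod ((-c - 1).toNat) 8
    rw [Nat.land_comm] at this
    rw [this]
    omega
  · norm_num at h2

set_option maxRecDepth 100000 in
set_option maxHeartbeats 12000000 in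
lemma pv_table : ∀ m ∈ List.range 256,
    pvIter 8 ((m : Nat) : Int) = PySem.List.pyGetD crc32TableEx ((m : Nat) : Int) 0 := by
  decide

lemma pv_stepB (c : Int) :
    (PySem.List.pyRange 0 8).foldl
      (fun c _ =>
        if PySem.Int.band c 1 ≠ 0 then PySem.Int.bxor (c >>> (1 : Nat)) 0xEDB88320
        else c >>> (1 : Nat)) c = pvIter 8 c := by
  rw [show PySem.List.pyRange 0 8 = [0, 1, 2, 3, 4, 5, 6, 7] by decide]
  simp only [List.foldl]
  rfl

lemma pv_step (crc x : Int) :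
    PySem.Int.bxor
      (PySem.List.pyGetD crc32TableEx
        (PySem.Int.band (PySem.Int.bxor crc (PySem.Int.band x 0xFF)) 0xFF) 0)
      (crc >>> (8 : Nat))
    = pvIter 8 (PySem.Int.bxor crc (PySem.Int.band x 0xFF)) := by
  set c := PySem.Int.bxor crc (PySem.Int.band x 0xFF) with hc
  have hv0 : 0 ≤ PySem.Int.band x 0xFF := by
    rw [pv_band_255]
    exact Int.emod_nonneg x (by norm_num)
  have hv1 : PySem.Int.band x 0xFF < 256 := by
    rw [pv_band_255]
    exact Int.emod_lt_of_pos x (by norm_num)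
  -- the high bits of c are exactly the high bits of crc: the xored-in byte is < 256
  have hhigh : crc >>> (8 : Nat) = c / 256 := by
    rw [pv_shiftRight_eight, hc, pv_bxor_eq_xor,
      show (256 : Int) = 2 ^ 8 by norm_num, pv_ediv_pow_xor,
      Int.ediv_eq_zero_of_lt hv0 (by simpa using hv1), pv_xor_zero]
  -- the low byte of c as a Nat below 256
  have hr0 : 0 ≤ c % 256 := Int.emod_nonneg c (by norm_num)
  have hr1 : c % 256 < 256 := Int.emod_lt_of_pos c (by norm_num)
  obtain ⟨m, hm⟩ := Int.eq_ofNat_of_zero_le hr0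
  have hmlt : m < 256 := by omega
  have htbl := pv_table m (List.mem_range.mpr hmlt)
  rw [show PySem.Int.band c 0xFF = ((m : Nat) : Int) by rw [pv_band_255, hm],
    ← htbl, hhigh, pv_bxor_eq_xor, ← hm,
    show (256 : Int) = 2 ^ 8 by norm_num, ← pv_iter_xor 8 (c % 2 ^ 8) (c / 2 ^ 8), pv_decomp]

theorem CalCrc32Ex_spec : Claim_equal_CalCrc32Ex := by
  intro datalist size initvalue _ _
  unfold Spec_CalCrc32Ex CalCrc32Ex CalCrc32Ex_alt
  split
  · rfl
  · refine PySem.List.foldl_congr_mem _ _ _ _ (fun crc index _ => ?_)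
    rw [pv_stepB]
    exact pv_step crc (PySem.List.pyGetD datalist index 0)
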